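-- pv_equiv track=rewrite | github.com/whysoboneless/nicole-web-app | services/analysis_service.py | group_search_results_by_channel
-- ===== SOURCE A (Python) =====
-- def group_search_results_by_channel(search_results, processed_channels):
--     channels = {}
--     for video in search_results:
--         channel_id = video.get('channelId')
--         if channel_id and channel_id not in processed_channels:
--             if channel_id not in channels:
--                 channels[channel_id] = []
--             channels[channel_id].append(video)
--     return channels
-- ===== SOURCE B (Python) =====
-- def group_search_results_by_channel(search_results, processed_channels):
--     filtered = [v for v in search_results
--                 if v.get('channelId') and v.get('channelId') not in processed_channels]
--     ids = list(dict.fromkeys(v['channelId'] for v in filtered))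
--     return {c: [v for v in filtered if v['channelId'] == c] for c in ids}
-- ===== Notes on version B (the rewrite author's own statement) =====
-- stated objective: alternative
-- what changed: B replaces A's single-pass incremental dict insertion by a three-stage pipeline: filter the eligible videos once, take the ordered-distinct channel ids via dict.fromkeys, and build each group with a per-id comprehension over the filtered list.
import Mathlib
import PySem

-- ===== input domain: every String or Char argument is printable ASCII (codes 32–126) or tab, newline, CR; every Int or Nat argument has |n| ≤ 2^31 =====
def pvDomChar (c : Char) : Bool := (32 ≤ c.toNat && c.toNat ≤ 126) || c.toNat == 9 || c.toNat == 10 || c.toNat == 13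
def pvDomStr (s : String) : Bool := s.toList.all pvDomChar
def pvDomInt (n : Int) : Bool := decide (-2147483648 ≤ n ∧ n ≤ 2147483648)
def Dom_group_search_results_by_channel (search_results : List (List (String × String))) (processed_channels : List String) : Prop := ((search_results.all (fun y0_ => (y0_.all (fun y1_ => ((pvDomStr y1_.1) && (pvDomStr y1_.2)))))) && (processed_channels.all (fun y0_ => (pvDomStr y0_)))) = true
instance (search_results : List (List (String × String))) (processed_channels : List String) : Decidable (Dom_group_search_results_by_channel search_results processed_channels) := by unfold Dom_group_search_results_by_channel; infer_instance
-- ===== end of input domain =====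

-- B replaces A's incremental dict insertion by a three-stage pipeline (filter once, ordered-distinct
-- ids via dict.fromkeys, one comprehension per id collecting its group); not faster — 'alternative'.

-- ===== PORT A =====
-- A: one pass, building the dict incrementally; returned dict rendered as its items list.
def group_search_results_by_channel (search_results : List (List (String × String))) (processed_channels : List String) : List (String × List (List (String × String))) :=
  (search_results.foldl (fun channels video =>
      match (PySem.Dict.mk video).get? "channelId" with   -- video.get('channelId')
      | some channel_id =>
        if (channel_id != "") && !(processed_channels.contains channel_id) then
          -- if channel_id not in channels: channels[channel_id] = []
          let channels' := if channels.contains channel_id then channels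
                           else channels.insert channel_id []
          -- channels[channel_id].append(video)
          channels'.modify channel_id [] (· ++ [video])
        else channels
      | none => channels)
    PySem.Dict.empty).items

-- ===== PORT B =====
-- the filter of Source B's first comprehension: v.get('channelId') and v.get('channelId') not in processed_channels
def pvFiltPred (processed_channels : List String) (video : List (String × String)) : Bool :=
  match (PySem.Dict.mk video).get? "channelId" with
  | some c => (c != "") && !(processed_channels.contains c)
  | none => false

-- v['channelId'] (the key is present on every video Source B indexes; getD "" is exact there)
def pvKey (video : List (String × String)) : String :=
  ((PySem.Dict.mk video).get? "channelId").getD ""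

def group_search_results_by_channel_alt (search_results : List (List (String × String))) (processed_channels : List String) : List (String × List (List (String × String))) :=
  let filtered := search_results.filter (pvFiltPred processed_channels)
  let ids := PySem.List.dedup (filtered.map pvKey)   -- list(dict.fromkeys(...))
  ids.map (fun c => (c, filtered.filter (fun v => pvKey v == c)))

-- ===== PRECONDITION & SPEC =====
def Spec_group_search_results_by_channel (search_results : List (List (String × String))) (processed_channels : List String) (out : List (String × List (List (String × String)))) : Prop := out = group_search_results_by_channel_alt search_results processed_channels
instance (search_results : List (List (String × String))) (processed_channels : List String) (out : List (String × List (List (String × String)))) : Decidable (Spec_group_search_results_by_channel search_results processed_channels out) := by unfold Spec_group_search_results_by_channel; infer_instance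

-- ===== CLAIM (what is proved, stated in full; the proofs are below) =====
def Claim_equal_group_search_results_by_channel : Prop := ∀ (search_results : List (List (String × String))) (processed_channels : List String), Dom_group_search_results_by_channel search_results processed_channels → Spec_group_search_results_by_channel search_results processed_channels (group_search_results_by_channel search_results processed_channels)

-- ===== LEMMAS AND PROOFS =====

-- the uniform per-video update both fold shapes reduce to
def pvStep (d : PySem.Dict String (List (List (String × String)))) (v : List (String × String)) : PySem.Dict String (List (List (String × String))) :=
  d.modify (pvKey v) [] (· ++ [v])

-- "insert [] if absent, then modify" is exactly "modify with default []"
theorem pvInsert_modify (d : PySem.Dict String (List (List (String × String)))) (c : String)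
    (g : List (List (String × String)) → List (List (String × String))) :
    (if d.contains c then d else d.insert c []).modify c [] g = d.modify c [] g := by
  by_cases h : d.contains c
  · simp [h]
  · have h' : d.contains c = false := by simpa using h
    simp [h', PySem.Dict.modify, PySem.Dict.getD_insert_self, PySem.Dict.insert_insert_self,
      PySem.Dict.getD_of_not_contains]

-- A's step is: if the Source B filter accepts the video, pvStep, else identity
theorem pvStepA_eq (pc : List String) (d : PySem.Dict String (List (List (String × String))))
    (v : List (String × String)) :
    (match (PySem.Dict.mk v).get? "channelId" with
      | some channel_id =>
        if (channel_id != "") && !(pc.contains channel_id) then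
          (if d.contains channel_id then d else d.insert channel_id []).modify channel_id [] (· ++ [v])
        else d
      | none => d)
    = if pvFiltPred pc v then pvStep d v else d := by
  unfold pvFiltPred pvStep pvKey
  cases (PySem.Dict.mk v).get? "channelId" with
  | none => simp
  | some c =>
    show (if ((c != "") && !(pc.contains c)) = true then
        (if d.contains c = true then d else d.insert c []).modify c [] (· ++ [v]) else d)
      = if ((c != "") && !(pc.contains c)) = true then d.modify c [] (· ++ [v]) else d
    by_cases hc : ((c != "") && !(pc.contains c)) = true
    · rw [if_pos hc, if_pos hc, pvInsert_modify]
    · rw [if_neg hc, if_neg hc]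

-- the fold over the filtered list, characterised as B's map
theorem pvFold_items (l : List (List (String × String))) :
    (l.foldl pvStep PySem.Dict.empty).items
    = (PySem.List.dedup (l.map pvKey)).map (fun c => (c, l.filter (fun v => pvKey v == c))) := by
  have hnd : (l.foldl pvStep PySem.Dict.empty).keys.Nodup := by
    unfold pvStep
    exact PySem.Dict.nodup_keys_foldl_modify_key l pvKey [] (fun _ v => (· ++ [v])) _ PySem.Dict.nodup_keys_empty
  have hkeys : (l.foldl pvStep PySem.Dict.empty).keys = PySem.List.dedup (l.map pvKey) := by
    unfold pvStep
    rw [PySem.Dict.keys_foldl_modify_key]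
    simp [PySem.Dict.keys_empty, PySem.Set.update_nil_left, PySem.List.dedup_eq_ofList]
  have hgetD : ∀ c, (l.foldl pvStep PySem.Dict.empty).getD c []
      = l.filter (fun v => pvKey v == c) := by
    intro c
    have hmap : l.foldl pvStep PySem.Dict.empty
        = (l.map (fun v => (pvKey v, v))).foldl (fun d p => d.modify p.1 [] (· ++ [p.2])) PySem.Dict.empty := by
      rw [List.foldl_map]; rfl
    rw [hmap, PySem.Dict.getD_foldl_modify_append]
    simp [List.filter_map, Function.comp_def, List.map_map]
  rw [PySem.Dict.items_eq_map_keys _ hnd [], hkeys]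
  exact List.map_congr_left (fun c _ => by rw [hgetD c])

-- ===== VERDICT (by name: the statement is the Claim_ definition above) =====
theorem group_search_results_by_channel_spec : Claim_equal_group_search_results_by_channel := by
  intro sr pc _
  unfold Spec_group_search_results_by_channel group_search_results_by_channel group_search_results_by_channel_alt
  have h1 : sr.foldl (fun channels video =>
      match (PySem.Dict.mk video).get? "channelId" with
      | some channel_id =>
        if (channel_id != "") && !(pc.contains channel_id) then
          (if channels.contains channel_id then channels else channels.insert channel_id []).modify channel_id [] (· ++ [video])
        else channels
      | none => channels) PySem.Dict.empty
      = (sr.filter (pvFiltPred pc)).foldl pvStep PySem.Dict.empty := by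
    rw [show (fun (channels : PySem.Dict String (List (List (String × String)))) (video : List (String × String)) =>
        match (PySem.Dict.mk video).get? "channelId" with
        | some channel_id =>
          if (channel_id != "") && !(pc.contains channel_id) then
            (if channels.contains channel_id then channels else channels.insert channel_id []).modify channel_id [] (· ++ [video])
          else channels
        | none => channels)
      = (fun d v => if pvFiltPred pc v then pvStep d v else d)
      from funext fun d => funext fun v => pvStepA_eq pc d v]
    rw [List.foldl_filter]
  simp only [h1, pvFold_items]
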